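-- pv_equiv track=rewrite | github.com/yonoteam/DeepIsaHOL | src/main/python/repl_loop.py | convert_by_to_apply
-- ===== SOURCE A (Python) =====
-- def convert_by_to_apply(by_statement:str):
--     """
--     Converts a 'by' statement into one or more 'apply' statements.
--
--     Args:
--         by_statement (str): A string starting with 'by', e.g., 'by (induct rule: hpMHDecidable.induct) (auto simp: hpMHDecidable_def)'
--
--     Returns:
--         str: The equivalent apply statement(s)
--     """
--
--     # Remove the 'by' prefix and strip any leading/trailing whitespace
--     args_string = by_statement.strip()[2:].strip()
--
--     # If there are no arguments, return an empty string
--     if not args_string: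
--         return "apply"
--
--     # Initialize variables
--     apply_statements = []
--     current_arg = ""
--     parenthesis_count = 0
--
--     # Process each character to correctly handle nested parentheses
--     for char in args_string:
--         if char == '(' and current_arg.strip() == "":
--             # Start of a new parenthesized argument
--             parenthesis_count = 1
--             current_arg += char
--         elif char == '(' and parenthesis_count > 0:
--             # Nested opening parenthesis
--             parenthesis_count += 1
--             current_arg += char
--         elif char == ')' and parenthesis_count > 0:
--             # Closing parenthesis
--             parenthesis_count -= 1
--             current_arg += char
--
--             # If we've closed all parentheses, add this argument
--             if parenthesis_count == 0 and current_arg.strip():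
--                 apply_statements.append(f"apply {current_arg.strip()}")
--                 current_arg = ""
--         else:
--             # Regular character
--             if parenthesis_count > 0:
--                 # Inside parentheses, add to current argument
--                 current_arg += char
--             elif char.strip():
--                 # Outside parentheses and not whitespace, start a new non-parenthesized argument
--                 current_arg += char
--             elif current_arg.strip():
--                 # Whitespace after a non-parenthesized argument
--                 apply_statements.append(f"apply {current_arg.strip()}")
--                 current_arg = ""
--
--     # Handle any remaining argument
--     if current_arg.strip():
--         apply_statements.append(f"apply {current_arg.strip()}")
--
--     # Join the apply statements with newlines
--     return "\n".join(apply_statements)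
-- ===== SOURCE B (Python) =====
-- def convert_by_to_apply(by_statement: str):
--     args = by_statement.strip()[2:].strip()
--     if not args:
--         return "apply"
--     out = []
--     i, n = 0, len(args)
--     while i < n:
--         if args[i].isspace():
--             i += 1
--             continue
--         start = i
--         if args[i] == '(':
--             depth = 1
--             i += 1
--             while i < n and depth > 0:
--                 if args[i] == '(':
--                     depth += 1
--                 elif args[i] == ')':
--                     depth -= 1
--                 i += 1
--         else:
--             while i < n and not args[i].isspace():
--                 i += 1
--         out.append("apply " + args[start:i].strip())
--     return "\n".join(out)
-- ===== Notes on version B (the rewrite author's own statement) =====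
-- stated objective: simpler
-- what changed: A threads one flat character loop through a five-way branch over a current-arg/paren-count state machine with flushes in three places; B is a two-level tokenizer: an outer loop that skips whitespace and, per token, runs a dedicated inner scan (a depth-tracked parenthesized group, or a maximal non-whitespace run) and emits one apply statement per token.
import Mathlib
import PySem

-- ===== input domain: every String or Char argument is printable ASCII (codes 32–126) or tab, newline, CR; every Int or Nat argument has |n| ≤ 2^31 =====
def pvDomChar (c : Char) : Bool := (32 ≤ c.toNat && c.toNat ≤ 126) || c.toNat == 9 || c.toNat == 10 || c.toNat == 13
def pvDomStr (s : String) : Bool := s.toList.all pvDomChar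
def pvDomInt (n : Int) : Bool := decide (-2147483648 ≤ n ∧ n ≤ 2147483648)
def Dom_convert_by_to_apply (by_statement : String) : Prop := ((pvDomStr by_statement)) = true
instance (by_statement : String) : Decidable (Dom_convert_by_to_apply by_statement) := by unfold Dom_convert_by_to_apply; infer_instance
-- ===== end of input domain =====

-- B replaces A's flat five-way state machine (current_arg / parenthesis_count juggled across one
-- character loop) by a two-level tokenizer: an outer loop over token starts with a dedicated inner
-- scan per token ('(...)' group by depth, or maximal non-whitespace run); objective: simpler.

-- ===== PORT A =====
-- A's loop state: (apply_statements, current_arg, parenthesis_count); chars as List Char,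
-- each statement kept as a List Char ("apply " ++ stripped arg), joined with '\n' at the end.
def pvA_step (st : List (List Char) × List Char × Int) (c : Char) :
    List (List Char) × List Char × Int :=
  let (stmts, cur, k) := st
  if c = '(' ∧ PySem.Chars.strip cur = [] then
    (stmts, cur ++ [c], 1)
  else if c = '(' ∧ k > 0 then
    (stmts, cur ++ [c], k + 1)
  else if c = ')' ∧ k > 0 then
    let k' := k - 1
    let cur' := cur ++ [c]
    if k' = 0 ∧ PySem.Chars.strip cur' ≠ [] then
      (stmts ++ ["apply ".toList ++ PySem.Chars.strip cur'], [], k')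
    else (stmts, cur', k')
  else if k > 0 then
    (stmts, cur ++ [c], k)
  else if PySem.Chars.strip [c] ≠ [] then
    (stmts, cur ++ [c], k)
  else if PySem.Chars.strip cur ≠ [] then
    (stmts ++ ["apply ".toList ++ PySem.Chars.strip cur], [], k)
  else (stmts, cur, k)

def convert_by_to_apply (by_statement : String) : String :=
  let args := PySem.Chars.strip
    (PySem.List.slice (PySem.Chars.strip by_statement.toList) (some 2) none)
  if args = [] then "apply"
  else
    let st := args.foldl pvA_step ([], [], 0)
    let stmts :=
      if PySem.Chars.strip st.2.1 ≠ [] then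
        st.1 ++ ["apply ".toList ++ PySem.Chars.strip st.2.1]
      else st.1
    String.ofList (PySem.Chars.join ['\n'] stmts)

-- ===== PORT B =====
-- inner loop for a '(...)' group token: consume until depth returns to 0 (or input ends)
def pvB_grab (l : List Char) (d : Int) (acc : List Char) : List Char × List Char :=
  match l with
  | [] => (acc, [])
  | c :: r =>
    let d' := if c = '(' then d + 1 else if c = ')' then d - 1 else d
    if d' > 0 then pvB_grab r d' (acc ++ [c]) else (acc ++ [c], r)

-- inner loop for a bare token: maximal run of non-whitespace characters
def pvB_bare (l : List Char) (acc : List Char) : List Char × List Char :=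
  match l with
  | [] => (acc, [])
  | c :: r => if PySem.Chars.isspace c then (acc, c :: r) else pvB_bare r (acc ++ [c])

-- termination facts for the outer loop (cited by pvB_scan's decreasing_by)
theorem pvB_grab_rest_le (l : List Char) (d : Int) (acc : List Char) :
    (pvB_grab l d acc).2.length ≤ l.length := by
  induction l generalizing d acc with
  | nil => simp [pvB_grab]
  | cons c r ih =>
    simp only [pvB_grab]
    split_ifs <;> first | exact le_trans (ih _ _) (Nat.le_succ _) | simp

theorem pvB_bare_rest_le (l : List Char) (acc : List Char) :
    (pvB_bare l acc).2.length ≤ l.length := by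
  induction l generalizing acc with
  | nil => simp [pvB_bare]
  | cons c r ih =>
    simp only [pvB_bare]
    split_ifs <;> first | exact le_trans (ih _) (Nat.le_succ _) | simp

-- outer loop: skip whitespace, then read one whole token per step
def pvB_scan (l : List Char) : List (List Char) :=
  match l with
  | [] => []
  | c :: r =>
    if PySem.Chars.isspace c then pvB_scan r
    else if c = '(' then
      let p := pvB_grab r 1 [c]
      ("apply ".toList ++ PySem.Chars.strip p.1) :: pvB_scan p.2
    else
      let p := pvB_bare r [c]
      ("apply ".toList ++ PySem.Chars.strip p.1) :: pvB_scan p.2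
termination_by l.length
decreasing_by
  · simp
  · have := pvB_grab_rest_le r 1 [c]; simp; omega
  · have := pvB_bare_rest_le r [c]; simp; omega

def convert_by_to_apply_alt (by_statement : String) : String :=
  let args := PySem.Chars.strip
    (PySem.List.slice (PySem.Chars.strip by_statement.toList) (some 2) none)
  if args = [] then "apply"
  else String.ofList (PySem.Chars.join ['\n'] (pvB_scan args))

-- ===== PRECONDITION & SPEC =====
def Spec_convert_by_to_apply (by_statement : String) (out : String) : Prop := out = convert_by_to_apply_alt by_statement
instance (by_statement : String) (out : String) : Decidable (Spec_convert_by_to_apply by_statement out) := by unfold Spec_convert_by_to_apply; infer_instance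

-- ===== CLAIM (what is proved, stated in full; the proofs are below) =====
def Claim_equal_convert_by_to_apply : Prop := ∀ (by_statement : String), Dom_convert_by_to_apply by_statement → Spec_convert_by_to_apply by_statement (convert_by_to_apply by_statement)

-- ===== LEMMAS AND PROOFS =====

theorem pv_dropWhile_eq_self (l : List Char)
    (h : ∀ x ∈ l, PySem.Chars.isspace x = false) :
    List.dropWhile PySem.Chars.isspace l = l := by
  induction l with
  | nil => simp
  | cons a t ih =>
    have ha := h a (by simp)
    rw [List.dropWhile_cons]
    simp only [ha, Bool.false_eq_true, if_false]

theorem pv_strip_eq_self (cur : List Char)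
    (h : ∀ x ∈ cur, PySem.Chars.isspace x = false) :
    PySem.Chars.strip cur = cur := by
  unfold PySem.Chars.strip PySem.Chars.rstrip PySem.Chars.lstrip
  rw [pv_dropWhile_eq_self cur h,
    pv_dropWhile_eq_self cur.reverse (fun x hx => h x (List.mem_reverse.mp hx)),
    List.reverse_reverse]

theorem pv_mem_dropWhile (x : Char) (l : List Char) (hx : x ∈ l)
    (h : PySem.Chars.isspace x = false) :
    x ∈ List.dropWhile PySem.Chars.isspace l := by
  induction l with
  | nil => simp at hx
  | cons a t ih =>
    rw [List.dropWhile_cons]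
    by_cases ha : PySem.Chars.isspace a = true
    · have hxt : x ∈ t := by
        rcases List.mem_cons.mp hx with rfl | hxt
        · rw [ha] at h; simp at h
        · exact hxt
      simpa [ha] using ih hxt
    · simp [ha, hx]

theorem pv_strip_ne_nil (cur : List Char) (x : Char) (hx : x ∈ cur)
    (hns : PySem.Chars.isspace x = false) : PySem.Chars.strip cur ≠ [] := by
  unfold PySem.Chars.strip PySem.Chars.rstrip PySem.Chars.lstrip
  have h1 := pv_mem_dropWhile x cur hx hns
  have h2 := pv_mem_dropWhile x (List.dropWhile PySem.Chars.isspace cur).reverse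
    (List.mem_reverse.mpr h1) hns
  exact List.ne_nil_of_mem (List.mem_reverse.mpr h2)

theorem pv_strip_single (c : Char) :
    PySem.Chars.strip [c] = if PySem.Chars.isspace c then [] else [c] := by
  by_cases hc : PySem.Chars.isspace c = true <;>
    simp [PySem.Chars.strip, PySem.Chars.rstrip, PySem.Chars.lstrip, hc]

theorem pv_paren_not_space : PySem.Chars.isspace '(' = false := by decide

-- finishing step of A's loop: flush the pending current_arg
def pvA_finish (st : List (List Char) × List Char × Int) : List (List Char) :=
  if PySem.Chars.strip st.2.1 ≠ [] then
    st.1 ++ ["apply ".toList ++ PySem.Chars.strip st.2.1]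
  else st.1

-- B-side continuation of A's mid-token state
def pvCont (l cur : List Char) (k : Int) : List (List Char) :=
  if 1 ≤ k then
    ("apply ".toList ++ PySem.Chars.strip (pvB_grab l k cur).1) :: pvB_scan (pvB_grab l k cur).2
  else if cur = [] then pvB_scan l
  else
    ("apply ".toList ++ PySem.Chars.strip (pvB_bare l cur).1) :: pvB_scan (pvB_bare l cur).2

-- one-step unfolding of pvB_scan (well-founded recursion)
theorem pv_scan_nil : pvB_scan [] = [] := by rw [pvB_scan.eq_def]

theorem pv_scan_cons (c : Char) (r : List Char) : pvB_scan (c :: r) =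
    (if PySem.Chars.isspace c then pvB_scan r
     else if c = '(' then
       ("apply ".toList ++ PySem.Chars.strip (pvB_grab r 1 [c]).1) :: pvB_scan (pvB_grab r 1 [c]).2
     else
       ("apply ".toList ++ PySem.Chars.strip (pvB_bare r [c]).1) :: pvB_scan (pvB_bare r [c]).2) := by
  rw [pvB_scan.eq_def]

theorem pv_key (l : List Char) (stmts : List (List Char)) (cur : List Char) (k : Int)
    (hinv : (k = 0 ∧ ∀ x ∈ cur, PySem.Chars.isspace x = false) ∨ (1 ≤ k ∧ '(' ∈ cur)) :
    pvA_finish (l.foldl pvA_step (stmts, cur, k)) = stmts ++ pvCont l cur k := by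
  induction l generalizing stmts cur k with
  | nil =>
    rcases hinv with ⟨hk, hns⟩ | ⟨hk, hmem⟩
    · subst hk
      by_cases hcur : cur = []
      · subst hcur
        simp [pvA_finish, pvCont, pv_scan_nil, PySem.Chars.strip, PySem.Chars.lstrip,
          PySem.Chars.rstrip]
      · have hs := pv_strip_eq_self cur hns
        simp [pvA_finish, pvCont, pvB_bare, pv_scan_nil, hcur, hs]
    · have hs := pv_strip_ne_nil cur '(' hmem pv_paren_not_space
      simp [pvA_finish, pvCont, pvB_grab, pv_scan_nil, hk, hs]
  | cons c r ih =>
    rw [List.foldl_cons]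
    rcases hinv with ⟨hk, hns⟩ | ⟨hk, hmem⟩
    · -- k = 0 : at a token boundary (cur = []) or inside a bare token
      subst hk
      by_cases hsp : PySem.Chars.isspace c = true
      · -- whitespace character
        have hcp : c ≠ '(' := by
          intro h; rw [h] at hsp; simp [pv_paren_not_space] at hsp
        by_cases hcur : cur = []
        · -- boundary: skip it
          subst hcur
          have hstep : pvA_step ((stmts : List (List Char)), ([] : List Char), (0 : Int)) c
              = (stmts, [], 0) := by
            simp [pvA_step, hcp, hsp, PySem.Chars.strip,
              PySem.Chars.lstrip, PySem.Chars.rstrip]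
          rw [hstep, ih stmts [] 0 (Or.inl ⟨rfl, by simp⟩)]
          simp [pvCont, pv_scan_cons, hsp]
        · -- whitespace ends a bare token: flush it
          have hs := pv_strip_eq_self cur hns
          have hstep : pvA_step ((stmts : List (List Char)), cur, (0 : Int)) c
              = (stmts ++ ["apply ".toList ++ PySem.Chars.strip cur], [], 0) := by
            simp [pvA_step, hcp, pv_strip_single, hsp, hs, hcur]
          rw [hstep, ih _ [] 0 (Or.inl ⟨rfl, by simp⟩)]
          simp [pvCont, pvB_bare, pv_scan_cons, hsp, hcur]
      · -- non-whitespace character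
        have hext : ∀ x ∈ cur ++ [c], PySem.Chars.isspace x = false := by
          intro x hx
          rcases List.mem_append.mp hx with hx | hx
          · exact hns x hx
          · simp at hx; subst hx; simpa using hsp
        by_cases hcp : c = '('
        · by_cases hcur : cur = []
          · -- '(' at a boundary: open a group
            subst hcur; subst hcp
            have hstep : pvA_step ((stmts : List (List Char)), ([] : List Char), (0 : Int)) '('
                = (stmts, ['('], 1) := by
              simp [pvA_step, PySem.Chars.strip, PySem.Chars.lstrip, PySem.Chars.rstrip]
            rw [hstep, ih stmts ['('] 1 (Or.inr ⟨le_refl 1, by simp⟩)]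
            simp [pvCont, pv_scan_cons, pv_paren_not_space]
          · -- '(' inside a bare token: absorbed
            have hs : PySem.Chars.strip cur ≠ [] := by
              rw [pv_strip_eq_self cur hns]; exact hcur
            have hstep : pvA_step ((stmts : List (List Char)), cur, (0 : Int)) c
                = (stmts, cur ++ [c], 0) := by
              simp [pvA_step, hs, pv_strip_single, hcp, pv_paren_not_space]
            rw [hstep, ih stmts (cur ++ [c]) 0 (Or.inl ⟨rfl, hext⟩)]
            simp [pvCont, pvB_bare, hsp, hcur]
        · -- plain character: start or extend a bare token
          have hstep : pvA_step ((stmts : List (List Char)), cur, (0 : Int)) c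
              = (stmts, cur ++ [c], 0) := by
            by_cases hcur : cur = []
            · subst hcur
              simp [pvA_step, hcp, hsp, PySem.Chars.strip,
                PySem.Chars.lstrip, PySem.Chars.rstrip]
            · have hs : PySem.Chars.strip cur ≠ [] := by
                rw [pv_strip_eq_self cur hns]; exact hcur
              simp [pvA_step, hcp, hs, pv_strip_single, hsp]
          rw [hstep, ih stmts (cur ++ [c]) 0 (Or.inl ⟨rfl, hext⟩)]
          by_cases hcur : cur = []
          · subst hcur
            simp [pvCont, pv_scan_cons, hsp, hcp]
          · simp [pvCont, pvB_bare, hsp, hcur]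
    · -- 1 ≤ k : inside a parenthesized group ('(' ∈ cur keeps current_arg.strip() nonempty)
      have hs := pv_strip_ne_nil cur '(' hmem pv_paren_not_space
      by_cases hcp : c = '('
      · -- nested open
        subst hcp
        have hstep : pvA_step ((stmts : List (List Char)), cur, k) '('
            = (stmts, cur ++ ['('], k + 1) := by
          simp [pvA_step, hs, show k > 0 by omega]
        have hg : pvB_grab ('(' :: r) k cur = pvB_grab r (k + 1) (cur ++ ['(']) := by
          rw [pvB_grab]
          simp [show k + 1 > 0 by omega]
        rw [hstep, ih stmts (cur ++ ['(']) (k + 1)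
          (Or.inr ⟨by omega, List.mem_append_left _ hmem⟩)]
        simp [pvCont, hg, hk, show (1 : Int) ≤ k + 1 by omega]
      · by_cases hcc : c = ')'
        · subst hcc
          by_cases hk1 : k = 1
          · -- the outermost parenthesis closes: flush the group
            subst hk1
            have hs' := pv_strip_ne_nil (cur ++ [')']) '('
              (List.mem_append_left _ hmem) pv_paren_not_space
            have hstep : pvA_step ((stmts : List (List Char)), cur, (1 : Int)) ')'
                = (stmts ++ ["apply ".toList ++ PySem.Chars.strip (cur ++ [')'])], [], 0) := by
              simp [pvA_step, hs']
            have hg : pvB_grab (')' :: r) 1 cur = (cur ++ [')'], r) := by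
              rw [pvB_grab]; simp
            rw [hstep, ih _ [] 0 (Or.inl ⟨rfl, by simp⟩)]
            simp [pvCont, hg]
          · -- an inner parenthesis closes
            have hstep : pvA_step ((stmts : List (List Char)), cur, k) ')'
                = (stmts, cur ++ [')'], k - 1) := by
              simp [pvA_step, hs, show k > 0 by omega, show ¬ (k - 1 = 0) by omega]
            have hg : pvB_grab (')' :: r) k cur = pvB_grab r (k - 1) (cur ++ [')']) := by
              rw [pvB_grab]
              simp
              intro h
              exact absurd h (by omega)
            rw [hstep, ih stmts (cur ++ [')']) (k - 1)
              (Or.inr ⟨by omega, List.mem_append_left _ hmem⟩)]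
            simp [pvCont, hg, hk, show (1 : Int) ≤ k - 1 by omega]
        · -- any other character inside the group
          have hstep : pvA_step ((stmts : List (List Char)), cur, k) c
              = (stmts, cur ++ [c], k) := by
            simp [pvA_step, hs, hcp, hcc, show k > 0 by omega]
          have hg : pvB_grab (c :: r) k cur = pvB_grab r k (cur ++ [c]) := by
            rw [pvB_grab]
            simp [hcp, hcc, show k > 0 by omega]
          rw [hstep, ih stmts (cur ++ [c]) k
            (Or.inr ⟨hk, List.mem_append_left _ hmem⟩)]
          simp [pvCont, hg, hk]

theorem pv_main (args : List Char) :
    pvA_finish (args.foldl pvA_step ([], [], 0)) = pvB_scan args := by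
  have h := pv_key args [] [] 0 (Or.inl ⟨rfl, by simp⟩)
  rw [h, pvCont]
  simp

-- ===== VERDICT (by name: the statement is the Claim_ definition above) =====
theorem convert_by_to_apply_spec : Claim_equal_convert_by_to_apply := by
  intro s _
  unfold Spec_convert_by_to_apply convert_by_to_apply convert_by_to_apply_alt
  by_cases h : PySem.Chars.strip
      (PySem.List.slice (PySem.Chars.strip s.toList) (some 2) none) = []
  · simp [h]
  · simp only [if_neg h]
    exact congrArg (fun l => String.ofList (PySem.Chars.join ['\n'] l))
      (pv_main _)
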